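-- pv_equiv track=rewrite | github.com/derekgauger/competitive_programming | Graphs/find_a_path_even_odd.py | find_a_path_dfs
-- ===== SOURCE A (Python) =====
-- ODD = 1
--
-- def dfs(curr, tgt, edges, visited):
--     # Skip the node if it has already been visited
--     if visited[curr]:
--         return False
--     # If the target was found, then a path exists
--     if curr == tgt:
--         return True
--     # Mark the node visited and continue searching all targets
--     visited[curr] = True
--     for target in edges[curr]:
--         if dfs(target, tgt, edges, visited):
--             return True
--     return False
--
-- def find_a_path_dfs(src, tgt, even_odd, V, E):
--     # Build a graph as adjacency list
--     visited = [False for _ in range(V*2)]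
--     edges = []
--     for i in range(V*2):
--         edges.append([])
--         visited[i] = False
--     # NOTE: vertices are 1 based but arrays are 0 based
--     # Connect even to odd vertices
--     # Connect odd to even vertices
--     for e in E:
--         src_even = e[0] - 1
--         src_odd = e[0] + V - 1
--         tgt_even = e[1] - 1
--         tgt_odd = e[1] + V - 1
--         edges[src_even].append(tgt_odd)
--         edges[src_odd].append(tgt_even)
--
--     tgt_even = tgt - 1
--     tgt_odd = tgt + V - 1
--     if even_odd == ODD:
--         real_target = tgt_odd
--     else:
--         real_target = tgt_even
--     return dfs(src - 1, real_target, edges, visited)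
-- ===== SOURCE B (Python) =====
-- ODD = 1
-- def find_a_path_dfs(src, tgt, even_odd, V, E):
--     n = V * 2
--     visited = [False] * n
--     edges = [[] for _ in range(n)]
--     for e in E:
--         edges[e[0] - 1].append(e[1] + V - 1)
--         edges[e[0] + V - 1].append(e[1] - 1)
--     real_target = tgt + V - 1 if even_odd == ODD else tgt - 1
--     queue = [src - 1]
--     head = 0
--     while head < len(queue):
--         u = queue[head]
--         head += 1
--         if visited[u]:
--             continue
--         if u == real_target:
--             return True
--         visited[u] = True
--         queue.extend(edges[u])
--     return False
-- ===== Notes on version B (the rewrite author's own statement) =====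
-- stated objective: idiomatic
-- what changed: The recursive depth-first search (with early return through nested calls and a mutated visited list) is replaced by an iterative FIFO worklist loop (breadth-first: a queue with a head index, pop front, skip visited, test target, mark, extend with neighbours); the layered-graph construction is kept.
-- outside the precondition, e.g. on find_a_path_dfs(2, 1, 1, 2, [(0, 1), (-1, -1), (-2, 1)]): A returns False, B returns True; on find_a_path_dfs(1, -2, 0, 2, [(-2, -2), (1, 2), (-3, 3)]): A returns True, B raises IndexError
import Mathlib
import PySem

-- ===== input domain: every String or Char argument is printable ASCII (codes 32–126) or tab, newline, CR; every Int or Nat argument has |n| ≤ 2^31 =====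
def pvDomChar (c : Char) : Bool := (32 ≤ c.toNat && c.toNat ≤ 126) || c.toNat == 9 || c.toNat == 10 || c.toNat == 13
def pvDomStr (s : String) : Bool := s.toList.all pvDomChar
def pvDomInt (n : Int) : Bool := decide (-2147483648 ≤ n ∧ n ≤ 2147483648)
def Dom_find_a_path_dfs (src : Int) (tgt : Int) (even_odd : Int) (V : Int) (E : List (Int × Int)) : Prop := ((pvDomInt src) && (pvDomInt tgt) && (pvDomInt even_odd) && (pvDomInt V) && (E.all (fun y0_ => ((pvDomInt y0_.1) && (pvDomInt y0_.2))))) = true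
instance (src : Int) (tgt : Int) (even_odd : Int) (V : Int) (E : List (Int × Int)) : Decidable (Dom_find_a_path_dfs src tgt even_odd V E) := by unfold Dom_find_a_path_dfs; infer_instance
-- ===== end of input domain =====

-- B replaces the recursive depth-first search by an iterative FIFO (breadth-first) worklist loop; same layered graph, same return value.


-- ===== PORT A =====
-- edges[i].append(x): read the row (Python index semantics, negative wraparound), write it back extended
def pvAppendAt (xss : List (List Int)) (i : Int) (x : Int) : Option (List (List Int)) :=
  (PySem.List.pyGet? xss i).bind (fun l => PySem.List.pySet? xss i (l ++ [x]))

-- the 'for e in E' edge-insertion loop (textually identical in A and B)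
def pvAddEdges (V : Int) (E : List (Int × Int)) (acc : Option (List (List Int))) : Option (List (List Int)) :=
  E.foldl (fun acc e =>
    acc.bind (fun es =>
      (pvAppendAt es (e.1 - 1) (e.2 + V - 1)).bind (fun es' =>
        pvAppendAt es' (e.1 + V - 1) (e.2 - 1)))) acc

mutual
-- recursive dfs of A; fuel only makes the recursion total (it never runs out, see the proofs)
def dfsA (fuel : Nat) (curr : Int) (tgt : Int) (edges : List (List Int)) (visited : List Bool) :
    Option (Bool × List Bool) :=
  match fuel with
  | 0 => none
  | f + 1 =>
    match PySem.List.pyGet? visited curr with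
    | none => none
    | some true => some (false, visited)
    | some false =>
      if curr = tgt then some (true, visited)
      else
        match PySem.List.pySet? visited curr true with
        | none => none
        | some visited' =>
          match PySem.List.pyGet? edges curr with
          | none => none
          | some nbrs => dfsLoopA f nbrs tgt edges visited'
termination_by (fuel, 0)

-- 'for target in edges[curr]: if dfs(...): return True' with the mutated visited threaded through
def dfsLoopA (fuel : Nat) (nbrs : List Int) (tgt : Int) (edges : List (List Int)) (visited : List Bool) :
    Option (Bool × List Bool) :=
  match nbrs with
  | [] => some (false, visited)
  | t :: rest =>
    match dfsA fuel t tgt edges visited with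
    | none => none
    | some (true, v') => some (true, v')
    | some (false, v') => dfsLoopA fuel rest tgt edges v'
termination_by (fuel, nbrs.length + 1)
end

def find_a_path_dfs (src : Int) (tgt : Int) (even_odd : Int) (V : Int) (E : List (Int × Int)) : Bool :=
  -- visited = [False for _ in range(V*2)]; edges = []; for i in range(V*2): edges.append([]); visited[i] = False
  let visited0 : List Bool := (PySem.List.pyRange 0 (V * 2) 1).map (fun _ => false)
  let p : List (List Int) × List Bool :=
    (PySem.List.pyRange 0 (V * 2) 1).foldl
      (fun (p : List (List Int) × List Bool) i => (p.1 ++ [([] : List Int)], PySem.List.pySetD p.2 i false))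
      (([] : List (List Int)), visited0)
  match pvAddEdges V E (some p.1) with
  | none => false            -- IndexError while building (outside Pre_)
  | some edges =>
    let real_target := if even_odd = 1 then tgt + V - 1 else tgt - 1
    match dfsA ((V * 2).toNat + 1) (src - 1) real_target edges p.2 with
    | none => false          -- IndexError / fuel (never inside Pre_)
    | some (b, _) => b

-- ===== PORT B =====
-- iterative BFS: queue with head pointer = the unconsumed suffix of the queue list
def bfsB (fuel : Nat) (queue : List Int) (rt : Int) (edges : List (List Int)) (visited : List Bool) :
    Option Bool :=
  match fuel with
  | 0 => none
  | f + 1 =>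
    match queue with
    | [] => some false
    | u :: rest =>
      match PySem.List.pyGet? visited u with
      | none => none
      | some true => bfsB f rest rt edges visited
      | some false =>
        if u = rt then some true
        else
          match PySem.List.pySet? visited u true, PySem.List.pyGet? edges u with
          | some v', some adj => bfsB f (rest ++ adj) rt edges v'
          | _, _ => none

def find_a_path_dfs_alt (src : Int) (tgt : Int) (even_odd : Int) (V : Int) (E : List (Int × Int)) : Bool :=
  let n := V * 2
  let visited : List Bool := List.replicate n.toNat false          -- [False] * n
  let edges0 : List (List Int) := (PySem.List.pyRange 0 n 1).map (fun _ => ([] : List Int))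
  match pvAddEdges V E (some edges0) with
  | none => false
  | some edges =>
    let real_target := if even_odd = 1 then tgt + V - 1 else tgt - 1
    match bfsB (n.toNat + 2 * E.length + 2) [src - 1] real_target edges visited with
    | none => false
    | some b => b

-- ===== PRECONDITION & SPEC =====
-- the raw values the search can visit: src-1 and every appended edge target
def pvCurrs (src : Int) (V : Int) (E : List (Int × Int)) : List Int :=
  (src - 1) :: E.flatMap (fun e => [e.2 + V - 1, e.2 - 1])

-- Pre_ excludes inputs where an index is out of Python's wraparound range (A raises IndexError there,
-- possibly depending on traversal order) and inputs where two distinct raw node values (difference 2V)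
-- alias the same wrapped cell of the visited array: there A's answer depends on the order its traversal
-- happens to test the aliases, an accidental artefact of 0-based negative-index wraparound, and A and B
-- may legitimately differ.
def Pre_find_a_path_dfs (src : Int) (tgt : Int) (even_odd : Int) (V : Int) (E : List (Int × Int)) : Prop :=
  1 ≤ V ∧ 1 - 2 * V ≤ src ∧ src ≤ 2 * V ∧
  (∀ e ∈ E, 1 - 2 * V ≤ e.1 ∧ e.1 ≤ V ∧ 1 - 2 * V ≤ e.2 ∧ e.2 ≤ V) ∧
  (∀ x ∈ pvCurrs src V E, ∀ y ∈ pvCurrs src V E, x - y ≠ 2 * V)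
instance (src : Int) (tgt : Int) (even_odd : Int) (V : Int) (E : List (Int × Int)) :
    Decidable (Pre_find_a_path_dfs src tgt even_odd V E) := by unfold Pre_find_a_path_dfs; infer_instance

def pvWitness_find_a_path_dfs : Int × Int × Int × Int × (List (Int × Int)) := (1, 2, 1, 2, [(1, 2)])

def Spec_find_a_path_dfs (src : Int) (tgt : Int) (even_odd : Int) (V : Int) (E : List (Int × Int)) (out : Bool) : Prop := out = find_a_path_dfs_alt src tgt even_odd V E
instance (src : Int) (tgt : Int) (even_odd : Int) (V : Int) (E : List (Int × Int)) (out : Bool) : Decidable (Spec_find_a_path_dfs src tgt even_odd V E out) := by unfold Spec_find_a_path_dfs; infer_instance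

-- ===== CLAIM (what is proved, stated in full; the proofs are below) =====
def Claim_equal_find_a_path_dfs : Prop := ∀ (src : Int) (tgt : Int) (even_odd : Int) (V : Int) (E : List (Int × Int)), Dom_find_a_path_dfs src tgt even_odd V E → Pre_find_a_path_dfs src tgt even_odd V E → Spec_find_a_path_dfs src tgt even_odd V E (find_a_path_dfs src tgt even_odd V E)

-- ===== LEMMAS AND PROOFS =====

-- the wrapped cell Python's s[i] addresses, for -L ≤ i < L (mirrors PySem.List.pyIdx?)
def pvCell (L : Nat) (i : Int) : Nat := if 0 ≤ i then i.toNat else L - (-i).toNat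

-- all adjacency entries satisfy P (the "legal raw node value" predicate)
def pvGood (edges : List (List Int)) (P : Int → Prop) : Prop :=
  ∀ l ∈ edges, ∀ x ∈ l, P x

-- there is a path u → … → rt whose nodes other than rt are unvisited in v
inductive pvReach (n : Nat) (edges : List (List Int)) (rt : Int) (v : List Bool) : Int → Prop
  | done : pvReach n edges rt v rt
  | step {u w : Int} : v.getD (pvCell n u) false = false → u ≠ rt →
      w ∈ edges.getD (pvCell n u) [] → pvReach n edges rt v w → pvReach n edges rt v u

def pvSub (v v' : List Bool) : Prop := ∀ j : Nat, v'.getD j false = false → v.getD j false = false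

def pvFree (n : Nat) (P : Int → Prop) (rt : Int) (v : List Bool) : Prop :=
  P rt → v.getD (pvCell n rt) false = false

def pvCnt (v : List Bool) : Nat := v.count false

def pvSumLen (es : List (List Int)) : Nat := (es.map List.length).sum

def pvPot (edges : List (List Int)) (v : List Bool) : Nat :=
  ∑ i ∈ Finset.range v.length, (if v.getD i false = false then 1 + (edges.getD i []).length else 0)

theorem pvIdx_in (L : Nat) {i : Int} (h0 : -(L : Int) ≤ i) (h1 : i < (L : Int)) :
    PySem.List.pyIdx? L i = some (pvCell L i) := by
  by_cases h : 0 ≤ i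
  · simp [PySem.List.pyIdx?, pvCell, h, h1]
  · simp [PySem.List.pyIdx?, pvCell, h, h0]

theorem pvCell_lt (L : Nat) {i : Int} (h0 : -(L : Int) ≤ i) (h1 : i < (L : Int)) :
    pvCell L i < L := by
  unfold pvCell
  split_ifs <;> omega

theorem pvGet_in {α : Type} (d : α) (xs : List α) {i : Int} (h0 : -(xs.length : Int) ≤ i)
    (h1 : i < (xs.length : Int)) :
    PySem.List.pyGet? xs i = some (xs.getD (pvCell xs.length i) d) := by
  unfold PySem.List.pyGet?
  rw [pvIdx_in _ h0 h1]
  simp only [Option.bind_some]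
  rw [List.getElem?_eq_getElem (pvCell_lt _ h0 h1), List.getD_eq_getElem _ _ (pvCell_lt _ h0 h1)]

theorem pvSet_in {α : Type} (xs : List α) {i : Int} (h0 : -(xs.length : Int) ≤ i)
    (h1 : i < (xs.length : Int)) (v : α) :
    PySem.List.pySet? xs i v = some (xs.set (pvCell xs.length i) v) := by
  unfold PySem.List.pySet?
  rw [pvIdx_in _ h0 h1, Option.map_some]

theorem pvReach_anti {n : Nat} {e : List (List Int)} {rt : Int} {v v' : List Bool} (h : pvSub v v')
    {x : Int} (hr : pvReach n e rt v' x) : pvReach n e rt v x := by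
  induction hr with
  | done => exact pvReach.done
  | step hu hne hw _ ih => exact pvReach.step (h _ hu) hne hw ih

theorem pvSub_set (v : List Bool) (j : Nat) : pvSub v (v.set j true) := by
  intro k hk
  by_cases hjk : j = k
  · subst hjk
    by_cases hjl : j < v.length
    · simp [List.getD, List.getElem?_set_self hjl] at hk
    · rwa [List.set_eq_of_length_le (by omega)] at hk
  · rwa [List.getD, List.getElem?_set_ne hjk, ← List.getD] at hk

theorem pvMark {n : Nat} {e : List (List Int)} {P : Int → Prop} {rt m : Int} {v : List Bool}
    (hg : pvGood e P)
    (hrange : ∀ x, P x → -(n : Int) ≤ x ∧ x < (n : Int))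
    (hinj : ∀ x y, P x → P y → pvCell n x = pvCell n y → x = y)
    (hel : e.length = n)
    (hPm : P m) (hmrt : m ≠ rt)
    {x : Int} (hr : pvReach n e rt v x) (hPx : P x) :
    pvReach n e rt (v.set (pvCell n m) true) x ∨
      ∃ w ∈ e.getD (pvCell n m) [], pvReach n e rt (v.set (pvCell n m) true) w := by
  revert hPx
  induction hr with
  | done => exact fun _ => Or.inl pvReach.done
  | @step u w hu hne hw hr' ih =>
    intro hPu
    obtain ⟨hu0, hun⟩ := hrange u hPu
    have hrow : e.getD (pvCell n u) [] ∈ e := by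
      rw [List.getD_eq_getElem _ _ (by rw [hel]; exact pvCell_lt n hu0 hun)]
      exact List.getElem_mem _
    have hPw := hg _ hrow _ hw
    by_cases hum : u = m
    · subst hum
      rcases ih hPw with h | h
      · exact Or.inr ⟨w, hw, h⟩
      · exact Or.inr h
    · have hcells : pvCell n m ≠ pvCell n u := fun hc => hum (hinj _ _ hPu hPm hc.symm)
      have hu' : (v.set (pvCell n m) true).getD (pvCell n u) false = false := by
        rwa [List.getD, List.getElem?_set_ne hcells, ← List.getD]
      rcases ih hPw with h | h
      · exact Or.inl (pvReach.step hu' hne hw h)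
      · exact Or.inr h

theorem pvCnt_set {v : List Bool} {j : Nat} (hj : j < v.length) (hf : v.getD j false = false) :
    pvCnt v = pvCnt (v.set j true) + 1 := by
  induction v generalizing j with
  | nil => simp at hj
  | cons b t ih =>
    cases j with
    | zero =>
      simp [List.getD] at hf
      subst hf
      simp [pvCnt, List.count_cons]
    | succ j =>
      have hj' : j < t.length := by simpa using hj
      have hf' : t.getD j false = false := by simpa [List.getD] using hf
      have := ih hj' hf'
      simp only [pvCnt, List.set, List.count_cons] at this ⊢
      omega

theorem pvPot_set {e : List (List Int)} {v : List Bool} {j : Nat} (hj : j < v.length)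
    (hf : v.getD j false = false) :
    pvPot e v = pvPot e (v.set j true) + (1 + (e.getD j []).length) := by
  unfold pvPot
  rw [List.length_set]
  rw [← Finset.add_sum_erase (Finset.range v.length)
        (fun i => if v.getD i false = false then 1 + (e.getD i []).length else 0)
        (Finset.mem_range.2 hj)]
  rw [← Finset.add_sum_erase (Finset.range v.length)
        (fun i => if (v.set j true).getD i false = false then 1 + (e.getD i []).length else 0)
        (Finset.mem_range.2 hj)]
  have h1 : (v.set j true).getD j false = true := by
    rw [List.getD, List.getElem?_set_self hj]; rfl
  have h2 : ∀ i ∈ (Finset.range v.length).erase j,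
      (if v.getD i false = false then 1 + (e.getD i []).length else 0)
        = (if (v.set j true).getD i false = false then 1 + (e.getD i []).length else 0) := by
    intro i hi
    have hij : j ≠ i := fun h => (Finset.mem_erase.1 hi).1 h.symm
    simp only [List.getD]
    rw [List.getElem?_set_ne hij]
  rw [Finset.sum_congr rfl h2]
  simp only [hf, h1, if_pos, if_neg, Bool.true_eq_false, ite_true, ite_false, if_false]
  omega

theorem pvSumLen_set_append : ∀ (es : List (List Int)) (k : Nat), k < es.length → ∀ x : Int,
    pvSumLen (es.set k (es.getD k [] ++ [x])) = pvSumLen es + 1 := by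
  intro es
  induction es with
  | nil => intro k hk; simp at hk
  | cons a t ih =>
    intro k hk x
    cases k with
    | zero => simp [pvSumLen, List.getD]; omega
    | succ k =>
      have := ih k (by simpa using hk) x
      simp only [pvSumLen, List.set, List.map_cons, List.sum_cons, List.getD_cons_succ] at this ⊢
      omega

theorem pvAppendAt_spec {es : List (List Int)} {n : Nat} {P : Int → Prop} {i x : Int}
    (hlen : es.length = n) (hg : pvGood es P) (hi0 : -(n : Int) ≤ i) (hin : i < (n : Int))
    (hPx : P x) :
    ∃ es', pvAppendAt es i x = some es' ∧ es'.length = n ∧ pvGood es' P ∧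
      pvSumLen es' = pvSumLen es + 1 := by
  have hi0' : -(es.length : Int) ≤ i := by omega
  have hin' : i < (es.length : Int) := by omega
  have hlt : pvCell es.length i < es.length := pvCell_lt _ hi0' hin'
  refine ⟨es.set (pvCell es.length i) (es.getD (pvCell es.length i) [] ++ [x]), ?_, ?_, ?_, ?_⟩
  · unfold pvAppendAt
    rw [pvGet_in [] es hi0' hin']
    simp only [Option.bind_some]
    rw [pvSet_in es hi0' hin']
  · simpa using hlen
  · intro l hl y hy
    rcases List.mem_or_eq_of_mem_set hl with h | h
    · exact hg _ h _ hy
    · subst h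
      rcases List.mem_append.1 hy with h | h
      · refine hg _ ?_ _ h
        rw [List.getD_eq_getElem _ _ hlt]; exact List.getElem_mem _
      · simp at h; subst h; exact hPx
  · exact pvSumLen_set_append es _ hlt x

-- building the adjacency lists succeeds under Pre_ and yields a well-formed graph
theorem pvAddEdges_spec {V : Int} (hV : 1 ≤ V) (P : Int → Prop) :
    ∀ (E : List (Int × Int)) (es : List (List Int)),
      (∀ e ∈ E, 1 - 2 * V ≤ e.1 ∧ e.1 ≤ V) →
      (∀ e ∈ E, P (e.2 + V - 1) ∧ P (e.2 - 1)) →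
      es.length = (V * 2).toNat → pvGood es P →
      ∃ es', pvAddEdges V E (some es) = some es' ∧ es'.length = (V * 2).toNat ∧
        pvGood es' P ∧ pvSumLen es' = pvSumLen es + 2 * E.length := by
  have hcast : ((V * 2).toNat : Int) = V * 2 := by omega
  intro E
  induction E with
  | nil => intro es _ _ h1 h2; exact ⟨es, rfl, h1, h2, by simp⟩
  | cons e E' ih =>
    intro es hE hT hlen hgood
    obtain ⟨h11, h12⟩ := hE e (by simp)
    obtain ⟨hP1, hP2⟩ := hT e (by simp)
    obtain ⟨es1, heq1, hl1, hg1, hs1⟩ :=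
      pvAppendAt_spec (i := e.1 - 1) (x := e.2 + V - 1) hlen hgood (by omega) (by omega) hP1
    obtain ⟨es2, heq2, hl2, hg2, hs2⟩ :=
      pvAppendAt_spec (i := e.1 + V - 1) (x := e.2 - 1) hl1 hg1 (by omega) (by omega) hP2
    obtain ⟨es', heq', hl', hg', hs'⟩ :=
      ih es2 (fun e he => hE e (by simp [he])) (fun e he => hT e (by simp [he])) hl2 hg2
    refine ⟨es', ?_, hl', hg', ?_⟩
    · unfold pvAddEdges at heq' ⊢
      rw [List.foldl_cons]
      simp only [Option.bind_some]
      rw [heq1]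
      simp only [Option.bind_some]
      rw [heq2]
      exact heq'
    · rw [hs', hs2, hs1]; simp [List.length_cons]; ring

-- main DFS lemma, proved jointly with the statement about the neighbour loop:
-- enough fuel ⇒ dfsA answers, and the answer is exactly pvReach
theorem pvDfs_main {n : Nat} {e : List (List Int)} {P : Int → Prop} {rt : Int}
    (hg : pvGood e P)
    (hrange : ∀ x, P x → -(n : Int) ≤ x ∧ x < (n : Int))
    (hinj : ∀ x y, P x → P y → pvCell n x = pvCell n y → x = y)
    (hel : e.length = n) :
    ∀ f : Nat,
      (∀ (curr : Int) (v : List Bool), v.length = n → P curr →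
        pvCnt v < f → pvFree n P rt v →
        ∃ b v', dfsA f curr rt e v = some (b, v') ∧ v'.length = n ∧
          (b = true → pvReach n e rt v curr) ∧
          (b = false → ¬ pvReach n e rt v curr ∧ pvSub v v' ∧ pvCnt v' ≤ pvCnt v ∧
            (∀ x : Int, P x → pvReach n e rt v x → pvReach n e rt v' x) ∧
            pvFree n P rt v'))
      ∧
      (∀ (nbrs : List Int) (v : List Bool), v.length = n →
        (∀ w ∈ nbrs, P w) → pvCnt v < f → pvFree n P rt v →
        ∃ b v', dfsLoopA f nbrs rt e v = some (b, v') ∧ v'.length = n ∧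
          (b = true → ∃ w ∈ nbrs, pvReach n e rt v w) ∧
          (b = false → (∀ w ∈ nbrs, ¬ pvReach n e rt v' w) ∧ pvSub v v' ∧ pvCnt v' ≤ pvCnt v ∧
            (∀ x : Int, P x → pvReach n e rt v x → pvReach n e rt v' x) ∧
            pvFree n P rt v')) := by
  intro f
  induction f with
  | zero => exact ⟨fun _ _ _ _ hc => absurd hc (by omega), fun _ _ _ _ hc => absurd hc (by omega)⟩
  | succ f ih =>
    have hP : ∀ (curr : Int) (v : List Bool), v.length = n → P curr →
        pvCnt v < f + 1 → pvFree n P rt v →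
        ∃ b v', dfsA (f + 1) curr rt e v = some (b, v') ∧ v'.length = n ∧
          (b = true → pvReach n e rt v curr) ∧
          (b = false → ¬ pvReach n e rt v curr ∧ pvSub v v' ∧ pvCnt v' ≤ pvCnt v ∧
            (∀ x : Int, P x → pvReach n e rt v x → pvReach n e rt v' x) ∧
            pvFree n P rt v') := by
      intro curr v hvl hPc hcnt hfree
      obtain ⟨h0, hcn⟩ := hrange curr hPc
      have h0' : -(v.length : Int) ≤ curr := by omega
      have hvl' : curr < (v.length : Int) := by omega
      have hcell : pvCell n curr = pvCell v.length curr := by rw [hvl]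
      have hlt : pvCell n curr < n := pvCell_lt n h0 hcn
      rw [dfsA, pvGet_in false v h0' hvl', ← hcell]
      cases hvc : v.getD (pvCell n curr) false with
      | true =>
        refine ⟨false, v, rfl, hvl, by simp, fun _ => ⟨?_, fun j h => h, le_refl _, fun x _ h => h, hfree⟩⟩
        intro hr
        cases hr with
        | done => exact absurd (hfree hPc) (by rw [hvc]; simp)
        | step hu _ _ _ => exact absurd hu (by rw [hvc]; simp)
      | false =>
        by_cases hct : curr = rt
        · subst hct
          simp only [if_pos rfl]
          exact ⟨true, v, rfl, hvl, fun _ => pvReach.done, by simp⟩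
        · simp only [if_neg hct]
          rw [pvSet_in v h0' hvl' true, ← hcell, pvGet_in [] e (by omega) (by omega)]
          have hcelle : pvCell e.length curr = pvCell n curr := by rw [hel]
          rw [hcelle]
          set vm := v.set (pvCell n curr) true with hvm
          have hcnt' : pvCnt v = pvCnt vm + 1 := pvCnt_set (by omega) hvc
          have hvml : vm.length = n := by simp [hvm, hvl]
          have hfree' : pvFree n P rt vm := by
            intro hPrt
            have hcells : pvCell n curr ≠ pvCell n rt :=
              fun hc => hct (hinj _ _ hPc hPrt hc)
            rw [hvm, List.getD, List.getElem?_set_ne hcells, ← List.getD]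
            exact hfree hPrt
          have hrow : e.getD (pvCell n curr) [] ∈ e := by
            rw [List.getD_eq_getElem _ _ (by omega)]; exact List.getElem_mem _
          have hnb : ∀ w ∈ e.getD (pvCell n curr) [], P w := fun w hw => hg _ hrow _ hw
          obtain ⟨b, v', heq, hl, ht, hf⟩ :=
            ih.2 (e.getD (pvCell n curr) []) vm hvml hnb (by omega) hfree'
          refine ⟨b, v', heq, hl, ?_, ?_⟩
          · intro hb
            obtain ⟨w, hw, hrw⟩ := ht hb
            exact pvReach.step hvc hct hw (pvReach_anti (pvSub_set v (pvCell n curr)) hrw)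
          · intro hb
            obtain ⟨hdead, hsub, hcnt2, hpres, hfree2⟩ := hf hb
            refine ⟨?_, fun j h => pvSub_set v (pvCell n curr) j (hsub j h), by omega, ?_, hfree2⟩
            · intro hr
              cases hr with
              | done => exact hct rfl
              | @step _ w' hu hne hw' hr' =>
                rcases pvMark hg hrange hinj hel hPc hct hr' (hnb w' hw') with h | ⟨w'', hm, h⟩
                · exact hdead w' hw' (hpres w' (hnb w' hw') h)
                · exact hdead w'' hm (hpres w'' (hnb w'' hm) h)
            · intro x hPx hrx
              rcases pvMark hg hrange hinj hel hPc hct hrx hPx with h | ⟨w'', hm, h⟩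
              · exact hpres x hPx h
              · exact absurd (hpres w'' (hnb w'' hm) h) (hdead w'' hm)
    refine ⟨hP, ?_⟩
    intro nbrs
    induction nbrs with
    | nil =>
      intro v hvl _ _ hfree
      exact ⟨false, v, by rw [dfsLoopA], hvl, by simp,
        fun _ => ⟨by simp, fun j h => h, le_refl _, fun x _ h => h, hfree⟩⟩
    | cons t rest ihl =>
      intro v hvl hnbrs hcnt hfree
      obtain ⟨b1, v1, heq1, hl1, ht1, hf1⟩ := hP t v hvl (hnbrs t (by simp)) hcnt hfree
      rw [dfsLoopA, heq1]
      cases b1 with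
      | true =>
        exact ⟨true, v1, rfl, hl1, fun _ => ⟨t, by simp, ht1 rfl⟩, by simp⟩
      | false =>
        obtain ⟨hnr, hsub1, hcnt1, hpres1, hfree1⟩ := hf1 rfl
        obtain ⟨b, v', heq, hl, ht2, hf2⟩ :=
          ihl v1 hl1 (fun w hw => hnbrs w (by simp [hw])) (by omega) hfree1
        refine ⟨b, v', heq, hl, ?_, ?_⟩
        · intro hb
          obtain ⟨w, hw, hrw⟩ := ht2 hb
          exact ⟨w, by simp [hw], pvReach_anti hsub1 hrw⟩
        · intro hb
          obtain ⟨hdead, hsub2, hcnt2, hpres2, hfree2⟩ := hf2 hb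
          refine ⟨?_, fun j h => hsub1 j (hsub2 j h), by omega, ?_, hfree2⟩
          · intro w hw
            rcases List.mem_cons.1 hw with h | h
            · subst h
              exact fun hr => hnr (pvReach_anti (fun j hj => hsub1 j (hsub2 j hj)) hr)
            · exact hdead w h
          · intro x hPx hrx
            exact hpres2 x hPx (hpres1 x hPx hrx)

theorem dfsA_main {n : Nat} {e : List (List Int)} {P : Int → Prop} {rt : Int}
    (hg : pvGood e P)
    (hrange : ∀ x, P x → -(n : Int) ≤ x ∧ x < (n : Int))
    (hinj : ∀ x y, P x → P y → pvCell n x = pvCell n y → x = y)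
    (hel : e.length = n) :
    ∀ f : Nat, ∀ (curr : Int) (v : List Bool), v.length = n → P curr →
      pvCnt v < f → pvFree n P rt v →
      ∃ b v', dfsA f curr rt e v = some (b, v') ∧ v'.length = n ∧
        (b = true → pvReach n e rt v curr) ∧
        (b = false → ¬ pvReach n e rt v curr ∧ pvSub v v' ∧ pvCnt v' ≤ pvCnt v ∧
          (∀ x : Int, P x → pvReach n e rt v x → pvReach n e rt v' x) ∧
          pvFree n P rt v') := fun f => (pvDfs_main hg hrange hinj hel f).1

-- main BFS lemma
theorem bfsB_main {n : Nat} {e : List (List Int)} {P : Int → Prop} {rt : Int}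
    (hg : pvGood e P)
    (hrange : ∀ x, P x → -(n : Int) ≤ x ∧ x < (n : Int))
    (hinj : ∀ x y, P x → P y → pvCell n x = pvCell n y → x = y)
    (hel : e.length = n) :
    ∀ f : Nat, ∀ (q : List Int) (v : List Bool), v.length = n →
      (∀ u ∈ q, P u) → pvFree n P rt v →
      q.length + pvPot e v < f →
      ∃ b, bfsB f q rt e v = some b ∧ (b = true ↔ ∃ u ∈ q, pvReach n e rt v u) := by
  intro f
  induction f with
  | zero => exact fun q v _ _ _ hc => absurd hc (by omega)
  | succ f ih =>
    intro q v hvl hq hfree hfuel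
    cases q with
    | nil => exact ⟨false, by rw [bfsB.eq_def], by simp⟩
    | cons u rest =>
      rw [bfsB.eq_def]
      dsimp only
      have hPu := hq u (by simp)
      obtain ⟨hu0, hun⟩ := hrange u hPu
      have h0' : -(v.length : Int) ≤ u := by omega
      have hvl' : u < (v.length : Int) := by omega
      have hcell : pvCell n u = pvCell v.length u := by rw [hvl]
      rw [pvGet_in false v h0' hvl', ← hcell]
      cases hvc : v.getD (pvCell n u) false with
      | true =>
        obtain ⟨b, heq, hiff⟩ := ih rest v hvl (fun w hw => hq w (by simp [hw])) hfree
          (by simp at hfuel ⊢; omega)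
        refine ⟨b, heq, hiff.trans ?_⟩
        constructor
        · rintro ⟨x, hx, hr⟩; exact ⟨x, by simp [hx], hr⟩
        · rintro ⟨x, hx, hr⟩
          rcases List.mem_cons.1 hx with h | h
          · subst h
            cases hr with
            | done => exact absurd (hfree hPu) (by rw [hvc]; simp)
            | step hu' _ _ _ => exact absurd hu' (by rw [hvc]; simp)
          · exact ⟨x, h, hr⟩
      | false =>
        by_cases hurt : u = rt
        · subst hurt
          simp only [if_pos rfl]
          exact ⟨true, rfl, ⟨fun _ => ⟨u, by simp, pvReach.done⟩, fun _ => rfl⟩⟩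
        · simp only [if_neg hurt]
          rw [pvSet_in v h0' hvl' true, ← hcell, pvGet_in [] e (by omega) (by omega)]
          have hcelle : pvCell e.length u = pvCell n u := by rw [hel]
          rw [hcelle]
          set vm := v.set (pvCell n u) true with hvm
          set adj := e.getD (pvCell n u) [] with hadj
          have hrow : adj ∈ e := by
            rw [hadj, List.getD_eq_getElem _ _ (by rw [hel]; exact pvCell_lt n hu0 hun)]
            exact List.getElem_mem _
          have hnb : ∀ w ∈ adj, P w := fun w hw => hg _ hrow _ hw
          have hvml : vm.length = n := by simp [hvm, hvl]
          have hfree' : pvFree n P rt vm := by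
            intro hPrt
            have hcells : pvCell n u ≠ pvCell n rt := fun hc => hurt (hinj _ _ hPu hPrt hc)
            rw [hvm, List.getD, List.getElem?_set_ne hcells, ← List.getD]
            exact hfree hPrt
          have hclt : pvCell n u < v.length := by rw [hvl]; exact pvCell_lt n hu0 hun
          have hpot : pvPot e v = pvPot e vm + (1 + adj.length) := pvPot_set hclt hvc
          obtain ⟨b, heq, hiff⟩ := ih (rest ++ adj) vm hvml
            (by intro w hw
                rcases List.mem_append.1 hw with h | h
                exacts [hq w (by simp [h]), hnb w h])
            hfree' (by simp at hfuel ⊢; omega)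
          refine ⟨b, heq, hiff.trans ?_⟩
          constructor
          · rintro ⟨x, hx, hr⟩
            rcases List.mem_append.1 hx with h | h
            · exact ⟨x, by simp [h], pvReach_anti (pvSub_set v (pvCell n u)) hr⟩
            · exact ⟨u, by simp, pvReach.step hvc hurt h (pvReach_anti (pvSub_set v (pvCell n u)) hr)⟩
          · rintro ⟨x, hx, hr⟩
            rcases List.mem_cons.1 hx with h | h
            · subst h
              cases hr with
              | done => exact absurd rfl hurt
              | @step _ w' _ _ hw' hr' =>
                rcases pvMark hg hrange hinj hel hPu hurt hr' (hnb w' hw') with hh | ⟨w'', hm, hh⟩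
                · exact ⟨w', List.mem_append.2 (Or.inr hw'), hh⟩
                · exact ⟨w'', List.mem_append.2 (Or.inr hm), hh⟩
            · have hPx := hq x (by simp [h])
              rcases pvMark hg hrange hinj hel hPu hurt hr hPx with hh | ⟨w'', hm, hh⟩
              · exact ⟨x, List.mem_append.2 (Or.inl h), hh⟩
              · exact ⟨w'', List.mem_append.2 (Or.inr hm), hh⟩

theorem pvSetFalse : ∀ {v : List Bool}, (∀ b ∈ v, b = false) → ∀ j : Nat, v.set j false = v := by
  intro v
  induction v with
  | nil => intro _ j; simp
  | cons b t ih =>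
    intro hv j
    cases j with
    | zero => simp [List.set, hv b (by simp)]
    | succ j => simp [List.set, ih (fun x hx => hv x (by simp [hx])) j]

theorem pvInitFold : ∀ (l : List Int), (∀ i ∈ l, 0 ≤ i) →
    ∀ (es : List (List Int)) (v0 : List Bool), (∀ b ∈ v0, b = false) →
    l.foldl (fun (p : List (List Int) × List Bool) i =>
        (p.1 ++ [([] : List Int)], PySem.List.pySetD p.2 i false)) (es, v0)
      = (es ++ l.map (fun _ => ([] : List Int)), v0) := by
  intro l
  induction l with
  | nil => intro _ es v0 _; simp
  | cons i t ih =>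
    intro hl es v0 hv
    have h0 : 0 ≤ i := hl i (by simp)
    have hset : PySem.List.pySetD v0 i false = v0 := by
      rw [PySem.List.pySetD_of_nonneg v0 false h0, pvSetFalse hv]
    simp only [List.foldl_cons, hset]
    rw [ih (fun j hj => hl j (by simp [hj])) (es ++ [[]]) v0 hv]
    simp

theorem pvSumLen_getD : ∀ (es : List (List Int)),
    ∑ i ∈ Finset.range es.length, (es.getD i []).length = pvSumLen es := by
  intro es
  induction es with
  | nil => simp [pvSumLen]
  | cons a t ih =>
    simp only [List.length_cons]
    rw [Finset.sum_range_succ']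
    simp only [List.getD_cons_succ, List.getD_cons_zero, ih]
    simp [pvSumLen]
    omega

theorem pvPot_false {e : List (List Int)} {v : List Bool} (hv : ∀ b ∈ v, b = false)
    (hlen : v.length = e.length) : pvPot e v = v.length + pvSumLen e := by
  unfold pvPot
  have h : ∀ i ∈ Finset.range v.length,
      (if v.getD i false = false then 1 + (e.getD i []).length else 0) = 1 + (e.getD i []).length := by
    intro i hi
    have : v.getD i false = false := by
      rw [List.getD_eq_getElem _ _ (Finset.mem_range.1 hi)]
      exact hv _ (List.getElem_mem _)
    rw [if_pos this]
  rw [Finset.sum_congr rfl h, Finset.sum_add_distrib, Finset.sum_const, Finset.card_range,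
    hlen, pvSumLen_getD]
  simp [mul_comm]

-- ===== VERDICT (by name: the statement is the Claim_ definition above) =====
theorem find_a_path_dfs_spec : Claim_equal_find_a_path_dfs := by
  unfold Claim_equal_find_a_path_dfs
  intro src tgt even_odd V E _ hpre
  obtain ⟨hV, hs1, hs2, hE, hNA⟩ := hpre
  unfold Spec_find_a_path_dfs
  simp only [find_a_path_dfs, find_a_path_dfs_alt]
  rw [pvInitFold _ (fun i hi => (PySem.List.mem_pyRange_one.1 hi).1) [] _ (by simp)]
  simp only [List.nil_append]
  -- both ports build from the same initial rows and the same edge loop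
  set es0 : List (List Int) := (PySem.List.pyRange 0 (V * 2) 1).map (fun _ => ([] : List Int)) with hes0
  have hncast : (((V * 2).toNat : Nat) : Int) = V * 2 := by omega
  have hes0len : es0.length = (V * 2).toNat := by
    simp [hes0, PySem.List.length_pyRange_one]
  set P : Int → Prop := fun x => x ∈ pvCurrs src V E with hPdef
  have hes0good : pvGood es0 P := by
    intro l hl x hx
    obtain ⟨a, ha, rfl⟩ := List.mem_map.1 hl
    simp at hx
  have hPE : ∀ e ∈ E, P (e.2 + V - 1) ∧ P (e.2 - 1) := by
    intro e he
    constructor <;>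
      exact List.mem_cons.2 (Or.inr (List.mem_flatMap.2 ⟨e, he, by simp⟩))
  obtain ⟨es', heqE, helen, hegood, hesum⟩ :=
    pvAddEdges_spec hV P E es0 (fun e he => ⟨(hE e he).1, (hE e he).2.1⟩) hPE hes0len hes0good
  have hesum0 : pvSumLen es0 = 0 := by
    simp [hes0, pvSumLen, List.map_map, Function.comp]
  rw [heqE]
  dsimp only
  -- the two visited arrays are the same list
  have hveq : (PySem.List.pyRange 0 (V * 2) 1).map (fun _ => false)
      = List.replicate (V * 2).toNat false := by
    have hlen : ((PySem.List.pyRange 0 (V * 2) 1).map (fun _ => false)).length = (V * 2).toNat := by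
      simp [PySem.List.length_pyRange_one]
    rw [← hlen]
    exact List.eq_replicate_length.2 (by simp)
  rw [hveq]
  set v0 : List Bool := List.replicate (V * 2).toNat false with hv0
  have hv0len : v0.length = (V * 2).toNat := by simp [hv0]
  have hv0false : ∀ b ∈ v0, b = false := by simp [hv0]
  have hv0cnt : pvCnt v0 = (V * 2).toNat := by
    unfold pvCnt
    rw [List.count_eq_length.2 (fun b hb => (hv0false b hb).symm)]
    exact hv0len
  have hv0getD : ∀ j : Nat, v0.getD j false = false := by
    intro j
    by_cases h : j < v0.length
    · rw [List.getD_eq_getElem _ _ h]; exact hv0false _ (List.getElem_mem _)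
    · simp [List.getD, List.getElem?_eq_none (le_of_not_gt h)]
  -- the legal raw node values: in wraparound range and pairwise non-aliasing
  have hrange : ∀ x, P x → -(((V * 2).toNat : Nat) : Int) ≤ x ∧ x < (((V * 2).toNat : Nat) : Int) := by
    intro x hx
    rw [hncast]
    rcases List.mem_cons.1 hx with h | h
    · omega
    · obtain ⟨e, he, hh⟩ := List.mem_flatMap.1 h
      obtain ⟨_, _, h3, h4⟩ := hE e he
      simp at hh
      rcases hh with h | h <;> omega
  have hinj : ∀ x y, P x → P y → pvCell (V * 2).toNat x = pvCell (V * 2).toNat y → x = y := by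
    intro x y hx hy hc
    have hbx := hrange x hx
    have hby := hrange y hy
    have h1 : x - y ≠ 2 * V := hNA x hx y hy
    have h2 : y - x ≠ 2 * V := hNA y hy x hx
    unfold pvCell at hc
    split_ifs at hc <;> omega
  set rt : Int := if even_odd = 1 then tgt + V - 1 else tgt - 1 with hrt
  have hfree0 : pvFree (V * 2).toNat P rt v0 := fun _ => hv0getD _
  have hPsrc : P (src - 1) := List.mem_cons.2 (Or.inl rfl)
  -- run A
  obtain ⟨bA, vA, heqA, _, htA, hfA⟩ :=
    dfsA_main hegood hrange hinj helen ((V * 2).toNat + 1) (src - 1) v0 hv0len hPsrc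
      (by omega) hfree0
  rw [heqA]
  dsimp only
  -- run B
  have hpot : pvPot es' v0 = (V * 2).toNat + 2 * E.length := by
    rw [pvPot_false hv0false (by omega), hv0len, hesum, hesum0]
    omega
  obtain ⟨bB, heqB, hiffB⟩ :=
    bfsB_main hegood hrange hinj helen ((V * 2).toNat + 2 * E.length + 2) [src - 1] v0 hv0len
      (by intro u hu; simp at hu; subst hu; exact hPsrc) hfree0
      (by simp [hpot]; omega)
  rw [heqB]
  dsimp only
  -- the two answers are both "rt is reachable from src-1"
  cases bA with
  | true =>
    have hr := htA rfl
    have : bB = true := hiffB.2 ⟨src - 1, by simp, hr⟩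
    rw [this]
  | false =>
    obtain ⟨hnr, _, _, _, _⟩ := hfA rfl
    cases hbB : bB with
    | true =>
      obtain ⟨u, hu, hr⟩ := hiffB.1 hbB
      simp at hu
      subst hu
      exact absurd hr hnr
    | false => rfl
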